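-- pv_equiv track=rewrite | github.com/arbilinskiy-dev/vk_all | backend_python/services/messages/parallel_loader.py | _distribute_offsets
-- ===== SOURCE A (Python) =====
-- from typing import Dict, Any, List
--
-- _PARALLEL_BATCH_SIZE = 200       # Размер одного запроса к VK API
--
-- def _distribute_offsets(
--     total_count: int,
--     num_tokens: int,
--     batch_size: int = _PARALLEL_BATCH_SIZE,
-- ) -> List[List[int]]:
--     """
--     Распределяет offset-ы между N токенами.
--
--     Пример: total_count=1000, num_tokens=3, batch_size=200
--     → 5 батчей (offsets 0,200,400,600,800)
--     → token0: [0, 600], token1: [200, 800], token2: [400]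
--
--     Возвращает список из N списков offset-ов (round-robin).
--     """
--     all_offsets = list(range(0, total_count, batch_size))
--     buckets: List[List[int]] = [[] for _ in range(num_tokens)]
--     for i, offset in enumerate(all_offsets):
--         buckets[i % num_tokens].append(offset)
--     return buckets
-- ===== SOURCE B (Python) =====
-- _PARALLEL_BATCH_SIZE = 200
--
-- def _distribute_offsets(total_count, num_tokens, batch_size=_PARALLEL_BATCH_SIZE):
--     # Token j's offsets form their own arithmetic progression: start at
--     # j*batch_size and jump num_tokens batches at a time. Compute each bucket
--     # directly instead of scattering every offset through i % num_tokens.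
--     stride = num_tokens * batch_size
--     return [list(range(j * batch_size, total_count, stride))
--             for j in range(num_tokens)]
-- ===== Notes on version B (the rewrite author's own statement) =====
-- stated objective: simpler
-- what changed: A materialises all offsets and scatters them one by one into num_tokens buckets via i % num_tokens; B never builds the combined offset list and computes each token's bucket directly as its own arithmetic progression range(j*batch_size, total_count, num_tokens*batch_size).
import Mathlib
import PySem

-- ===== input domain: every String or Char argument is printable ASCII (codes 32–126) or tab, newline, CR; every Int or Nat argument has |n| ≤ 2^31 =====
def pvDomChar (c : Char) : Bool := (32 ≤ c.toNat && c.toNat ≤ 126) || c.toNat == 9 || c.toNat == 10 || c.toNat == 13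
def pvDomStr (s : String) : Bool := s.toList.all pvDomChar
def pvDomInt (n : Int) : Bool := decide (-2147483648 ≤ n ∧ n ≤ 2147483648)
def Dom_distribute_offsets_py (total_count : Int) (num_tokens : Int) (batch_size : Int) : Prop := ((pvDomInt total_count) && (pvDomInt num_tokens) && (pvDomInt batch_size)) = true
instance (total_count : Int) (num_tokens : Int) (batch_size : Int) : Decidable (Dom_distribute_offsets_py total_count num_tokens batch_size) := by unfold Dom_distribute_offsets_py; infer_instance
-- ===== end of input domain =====

-- B replaces A's scatter loop (route offset i to bucket i % num_tokens) by computing each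
-- token's bucket directly as its own arithmetic progression range(j*batch_size, total_count,
-- num_tokens*batch_size); objective: simpler/alternative decomposition, same asymptotic cost.

-- ===== PORT A =====
def distribute_offsets_py (total_count : Int) (num_tokens : Int) (batch_size : Int) : List (List Int) :=
  let all_offsets := PySem.List.pyRange 0 total_count batch_size
  let buckets := (PySem.List.pyRange 0 num_tokens 1).map (fun _ => ([] : List Int))
  (PySem.List.enumerate all_offsets 0).foldl
    (fun acc p => acc.modify ((PySem.Int.mod p.1 num_tokens).toNat) (fun b => b ++ [p.2]))
    buckets

-- ===== PORT B =====
def distribute_offsets_py_alt (total_count : Int) (num_tokens : Int) (batch_size : Int) : List (List Int) :=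
  let stride := num_tokens * batch_size
  (PySem.List.pyRange 0 num_tokens 1).map
    (fun j => PySem.List.pyRange (j * batch_size) total_count stride)

-- ===== PRECONDITION & SPEC =====
-- Pre_ excludes exactly the inputs where Python A raises: batch_size = 0 (ValueError from range)
-- and num_tokens ≤ 0 with a non-empty offsets list (ZeroDivisionError for num_tokens = 0,
-- IndexError for num_tokens < 0).
def Pre_distribute_offsets_py (total_count : Int) (num_tokens : Int) (batch_size : Int) : Prop :=
  batch_size ≠ 0 ∧
    (0 < num_tokens ∨
      ¬((0 < total_count ∧ 0 < batch_size) ∨ (total_count < 0 ∧ batch_size < 0)))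
instance (total_count : Int) (num_tokens : Int) (batch_size : Int) : Decidable (Pre_distribute_offsets_py total_count num_tokens batch_size) := by unfold Pre_distribute_offsets_py; infer_instance

def pvWitness_distribute_offsets_py : Int × Int × Int := (1000, 3, 200)

def Spec_distribute_offsets_py (total_count : Int) (num_tokens : Int) (batch_size : Int) (out : List (List Int)) : Prop := out = distribute_offsets_py_alt total_count num_tokens batch_size
instance (total_count : Int) (num_tokens : Int) (batch_size : Int) (out : List (List Int)) : Decidable (Spec_distribute_offsets_py total_count num_tokens batch_size out) := by unfold Spec_distribute_offsets_py; infer_instance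

-- ===== CLAIM (what is proved, stated in full; the proofs are below) =====
def Claim_equal_distribute_offsets_py : Prop := ∀ (total_count : Int) (num_tokens : Int) (batch_size : Int), Dom_distribute_offsets_py total_count num_tokens batch_size → Pre_distribute_offsets_py total_count num_tokens batch_size → Spec_distribute_offsets_py total_count num_tokens batch_size (distribute_offsets_py total_count num_tokens batch_size)

-- ===== LEMMAS AND PROOFS =====

-- pvPick j n s xs: the elements of xs whose running index (starting at s) is ≡ j (mod n);
-- this is what A's round-robin scatter puts into bucket j.
def pvPick (j n : Nat) : Nat → List Int → List Int
  | _, [] => []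
  | s, x :: t => (if s % n = j then [x] else []) ++ pvPick j n (s + 1) t

lemma pvModShift (n x : Nat) (_hn : 0 < n) (hx : x < 2 * n) :
    x % n = if x < n then x else x - n := by
  split_ifs with h
  · exact Nat.mod_eq_of_lt h
  · rw [Nat.mod_eq_sub_mod (by omega), Nat.mod_eq_of_lt (by omega)]

lemma pvSuccMod (n s : Nat) : (s + 1) % n = (s % n + 1) % n := by
  conv_lhs => rw [← Nat.div_add_mod s n]
  rw [Nat.add_assoc, Nat.mul_add_mod]

lemma pvR_facts (j n s : Nat) (hn : 0 < n) (hj : j < n) :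
    ((j + n - s % n) % n = 0 ↔ s % n = j)
    ∧ (s % n = j → (j + n - (s + 1) % n) % n = n - 1)
    ∧ (s % n ≠ j → (j + n - (s + 1) % n) % n = (j + n - s % n) % n - 1) := by
  have ht : s % n < n := Nat.mod_lt _ hn
  rw [pvSuccMod n s, pvModShift n (s % n + 1) hn (by omega),
      pvModShift n (j + n - s % n) hn (by omega),
      pvModShift n (j + n - (if s % n + 1 < n then s % n + 1 else s % n + 1 - n)) hn (by omega)]
  split_ifs <;> omega

-- pyRange a b st is empty unless a lies strictly before b in the direction of st …
lemma pvRange_nil (a b st : Int) (hst : st ≠ 0)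
    (h : ¬((0 < st ∧ a < b) ∨ (st < 0 ∧ b < a))) :
    PySem.List.pyRange a b st = [] := by
  simp only [PySem.List.pyRange, if_neg hst]
  split_ifs with h1 h2 h3 <;> first | omega | simp

-- … and otherwise peels its first element, advancing the start by st.
lemma pvRange_cons (a b st : Int) (hst : st ≠ 0)
    (h : (0 < st ∧ a < b) ∨ (st < 0 ∧ b < a)) :
    PySem.List.pyRange a b st = a :: PySem.List.pyRange (a + st) b st := by
  have key : ∀ (d s : Int), 0 < s → 1 ≤ d →
      ((d + s - 1) / s).toNat = (if s < d then ((d - 1) / s).toNat else 0) + 1 := by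
    intro d s hs hd
    have h1 : (d + s - 1) / s = (d - 1) / s + 1 := by
      have h0 := Int.add_mul_ediv_right (d - 1) 1 (by omega : s ≠ 0)
      rw [show d + s - 1 = d - 1 + 1 * s by ring, h0]
    have h2 : 0 ≤ (d - 1) / s := Int.ediv_nonneg (by omega) (by omega)
    rw [h1]
    split_ifs with h3
    · omega
    · have : (d - 1) / s = 0 := Int.ediv_eq_zero_of_lt (by omega) (by omega)
      omega
  have mapstep : ∀ (c : Nat),
      List.map (fun k : Nat => a + st * (k : Int)) (List.range (c + 1))
        = a :: List.map (fun k : Nat => (a + st) + st * (k : Int)) (List.range c) := by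
    intro c
    rw [List.range_succ_eq_map, List.map_cons, List.map_map]
    refine congrArg₂ _ (by simp) (List.map_congr_left ?_)
    intro k _
    simp only [Function.comp_apply]
    push_cast
    ring
  rcases h with ⟨hpos, hab⟩ | ⟨hneg, hba⟩
  · simp only [PySem.List.pyRange, if_neg hst, if_pos hpos, if_pos hab]
    rw [key (b - a) st hpos (by omega), mapstep]
    congr 1
    rw [show b - (a + st) + st - 1 = b - a - 1 by ring]
    split_ifs <;> first | rfl | omega
  · have hst' : 0 < -st := by omega
    simp only [PySem.List.pyRange, if_neg hst, if_neg (by omega : ¬ 0 < st), if_pos hba]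
    rw [key (a - b) (-st) hst' (by omega), mapstep]
    congr 1
    rw [show a + st - b + - st - 1 = a - b - 1 by ring]
    split_ifs <;> first | rfl | omega

-- Bucket j of the round-robin split of an arithmetic progression is itself an
-- arithmetic progression with stride n·st.
lemma pvPick_pyRange (st : Int) (hst : st ≠ 0) (n : Nat) (hn : 0 < n) :
    ∀ (m : Nat) (a b : Int) (s j : Nat), j < n →
      m = (if 0 < st then (b - a).toNat else (a - b).toNat) →
      pvPick j n s (PySem.List.pyRange a b st)
        = PySem.List.pyRange (a + (((j + n - s % n) % n : Nat) : Int) * st) b ((n : Int) * st) := by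
  intro m
  induction m using Nat.strong_induction_on with
  | _ m IH =>
    intro a b s j hj hm
    have hncast : (0 : Int) < (n : Int) := by exact_mod_cast hn
    by_cases hbef : (0 < st ∧ a < b) ∨ (st < 0 ∧ b < a)
    · rw [pvRange_cons a b st hst hbef]
      show (if s % n = j then [a] else []) ++ pvPick j n (s + 1) (PySem.List.pyRange (a + st) b st) = _
      have hm' : (if 0 < st then (b - (a + st)).toNat else ((a + st) - b).toNat) < m := by
        rcases hbef with ⟨h1, h2⟩ | ⟨h1, h2⟩
        · rw [if_pos h1] at hm ⊢; omega
        · rw [if_neg (by omega)] at hm ⊢; omega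
      rw [IH _ hm' (a + st) b (s + 1) j hj rfl]
      obtain ⟨hz, he, hne⟩ := pvR_facts j n s hn hj
      by_cases hsj : s % n = j
      · have hr0 : (j + n - s % n) % n = 0 := hz.mpr hsj
        rw [if_pos hsj, he hsj, hr0]
        simp only [Nat.cast_zero, zero_mul, add_zero]
        have hSne : (n : Int) * st ≠ 0 := by
          rcases lt_or_gt_of_ne hst with h1 | h1
          · exact ne_of_lt (mul_neg_of_pos_of_neg hncast h1)
          · exact ne_of_gt (mul_pos hncast h1)
        have hBef : (0 < (n : Int) * st ∧ a < b) ∨ ((n : Int) * st < 0 ∧ b < a) := by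
          rcases hbef with ⟨h1, h2⟩ | ⟨h1, h2⟩
          · exact Or.inl ⟨mul_pos hncast h1, h2⟩
          · exact Or.inr ⟨mul_neg_of_pos_of_neg hncast h1, h2⟩
        rw [pvRange_cons a b ((n : Int) * st) hSne hBef, List.singleton_append]
        rw [show a + st + (((n - 1 : Nat) : Int)) * st = a + (n : Int) * st by
          push_cast [Nat.cast_sub (show 1 ≤ n by omega)]; ring]
      · rw [if_neg hsj, hne hsj]
        have hr1 : 1 ≤ (j + n - s % n) % n := by
          rcases Nat.eq_zero_or_pos ((j + n - s % n) % n) with h | h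
          · exact absurd (hz.mp h) hsj
          · omega
        rw [show (a + st) + (((((j + n - s % n) % n) - 1 : Nat) : Int)) * st
            = a + (((j + n - s % n) % n : Nat) : Int) * st by
          push_cast [Nat.cast_sub hr1]; ring]
        simp
    · rw [pvRange_nil a b st hst hbef]
      show ([] : List Int) = _
      have hrnn : (0 : Nat) ≤ (j + n - s % n) % n := Nat.zero_le _
      rcases lt_or_gt_of_ne hst with hneg | hpos
      · have hab : a ≤ b := by
          have h2 : ¬(st < 0 ∧ b < a) := fun hc => hbef (Or.inr hc)
          omega
        have hS : (n : Int) * st < 0 := mul_neg_of_pos_of_neg hncast hneg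
        have hnn : (((j + n - s % n) % n : Nat) : Int) * st ≤ 0 :=
          mul_nonpos_of_nonneg_of_nonpos (Nat.cast_nonneg _) (le_of_lt hneg)
        rw [pvRange_nil _ b ((n : Int) * st) (ne_of_lt hS)
          (by rintro (⟨h1, _⟩ | ⟨_, h2⟩) <;> linarith)]
      · have hba : b ≤ a := by
          have h2 : ¬(0 < st ∧ a < b) := fun hc => hbef (Or.inl hc)
          omega
        have hS : 0 < (n : Int) * st := mul_pos hncast hpos
        have hnn : 0 ≤ (((j + n - s % n) % n : Nat) : Int) * st :=
          mul_nonneg (Nat.cast_nonneg _) (le_of_lt hpos)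
        rw [pvRange_nil _ b ((n : Int) * st) (ne_of_gt hS)
          (by rintro (⟨_, h1⟩ | ⟨h2, _⟩) <;> linarith)]

-- A's scatter fold, started at index s on buckets B (|B| = n), appends pvPick j n s xs
-- to bucket j.
lemma pvScatter (n : Nat) (_hn : 0 < n) :
    ∀ (xs : List Int) (s : Nat) (B : List (List Int)), B.length = n →
      (PySem.List.enumerate xs ((s : Nat) : Int)).foldl
        (fun acc p => acc.modify ((PySem.Int.mod p.1 (n : Int)).toNat) (fun b => b ++ [p.2])) B
      = B.mapIdx (fun j b => b ++ pvPick j n s xs) := by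
  intro xs
  induction xs with
  | nil =>
    intro s B hB
    simp only [PySem.List.enumerate_nil, List.foldl_nil]
    apply List.ext_getElem
    · simp
    · intro i h1 h2
      simp [List.getElem_mapIdx, pvPick]
  | cons x t ih =>
    intro s B hB
    rw [PySem.List.enumerate_cons, List.foldl_cons]
    have h1 : ((s : Nat) : Int) + 1 = (((s + 1 : Nat)) : Int) := by push_cast; ring
    have hmod : (PySem.Int.mod ((s : Nat) : Int) (n : Int)).toNat = s % n := by
      rw [PySem.Int.mod_natCast]
      exact Int.toNat_natCast _
    rw [h1, hmod, ih (s + 1) _ (by simp [hB])]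
    apply List.ext_getElem
    · simp [hB]
    · intro i hi1 hi2
      have hiB : i < B.length := by simp at hi1; simpa [hB] using hi1
      rw [List.getElem_mapIdx, List.getElem_mapIdx, List.getElem_modify]
      show _ = B[i] ++ pvPick i n s (x :: t)
      have hpick : pvPick i n s (x :: t)
          = (if s % n = i then [x] else []) ++ pvPick i n (s + 1) t := rfl
      rw [hpick]
      by_cases hsi : s % n = i
      · rw [if_pos hsi, if_pos hsi, List.append_assoc]
      · rw [if_neg hsi, if_neg hsi, List.nil_append]

-- ===== VERDICT (by name: the statement is the Claim_ definition above) =====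
theorem distribute_offsets_py_spec : Claim_equal_distribute_offsets_py := by
  intro total_count num_tokens batch_size hdom hpre
  unfold Spec_distribute_offsets_py
  obtain ⟨hbs, hrest⟩ := hpre
  simp only [distribute_offsets_py, distribute_offsets_py_alt]
  by_cases hn : 0 < num_tokens
  · have hn0 : 0 < num_tokens.toNat := by omega
    have hcast : ((num_tokens.toNat : Nat) : Int) = num_tokens :=
      Int.toNat_of_nonneg (le_of_lt hn)
    rw [← hcast]
    set n := num_tokens.toNat with hndef
    have hlen : ((PySem.List.pyRange 0 ((n : Nat) : Int) 1).map
        (fun _ => ([] : List Int))).length = n := by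
      simp [PySem.List.length_pyRange_one]
    have hsc := pvScatter n hn0 (PySem.List.pyRange 0 total_count batch_size) 0 _ hlen
    rw [Nat.cast_zero] at hsc
    rw [hsc]
    apply List.ext_getElem
    · simp [PySem.List.length_pyRange_one]
    · intro i hi1 hi2
      have hiN : i < n := by
        simp [PySem.List.length_pyRange_one] at hi1
        omega
      rw [List.getElem_mapIdx, List.getElem_map, List.getElem_map,
          PySem.List.getElem_pyRange_one]
      have hr : (i + n - 0 % n) % n = i := by
        rw [Nat.zero_mod, Nat.sub_zero, Nat.add_mod_right, Nat.mod_eq_of_lt hiN]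
      rw [pvPick_pyRange batch_size hbs n hn0 _ 0 total_count 0 i hiN rfl, hr]
      simp
  · have hempty : PySem.List.pyRange 0 total_count batch_size = [] := by
      apply pvRange_nil _ _ _ hbs
      rcases hrest with h | h
      · omega
      · intro hc
        exact h (by rcases hc with ⟨h1, h2⟩ | ⟨h1, h2⟩ <;> omega)
    have htok : PySem.List.pyRange 0 num_tokens 1 = [] :=
      PySem.List.pyRange_one_eq_nil (by omega)
    simp [hempty, htok, PySem.List.enumerate_nil]
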